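-- pv_equiv track=rewrite | github.com/OTOYO1020/ChatDev_Intermediate | WareHouse/FD_195__20250518083212/happy_sets.py | count_happy_sets
-- ===== SOURCE A (Python) =====
-- from itertools import combinations
--
-- def is_coprime(x: int, y: int) -> bool:
--     '''Check if two integers are coprime.'''
--     while y:
--         x, y = y, x % y
--     return x == 1
--
-- def count_happy_sets(A: int, B: int) -> int:
--     '''Count the number of happy sets between A and B.'''
--     if A > B:
--         return 0  # Invalid input case
--     cards = list(range(A, B + 1))
--     happy_count = 0
--     # Generate all subsets using combinations
--     for r in range(len(cards) + 1):
--         for subset in combinations(cards, r):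
--             if len(subset) > 0:
--                 all_coprime = True
--                 for x, y in combinations(subset, 2):
--                     if not is_coprime(x, y):
--                         all_coprime = False
--                         break
--                 if all_coprime:
--                     happy_count += 1
--     return happy_count
-- ===== SOURCE B (Python) =====
-- def count_happy_sets(A: int, B: int) -> int:
--     '''Count the number of happy sets between A and B (pruned include/exclude backtracking).'''
--     if A > B:
--         return 0
--
--     def gcd(x, y):
--         while y:
--             x, y = y, x % y
--         return x
--
--     def go(cards, chosen):
--         if not cards:
--             return 0
--         x, rest = cards[0], cards[1:]
--         total = go(rest, chosen)  # subsets not containing x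
--         if all(gcd(c, x) == 1 for c in chosen):
--             # x is compatible with everything chosen so far:
--             # count {chosen + [x]} itself, plus its extensions
--             total += 1 + go(rest, chosen + [x])
--         return total
--
--     return go(list(range(A, B + 1)), [])
-- ===== Notes on version B (the rewrite author's own statement) =====
-- stated objective: alternative
-- what changed: Replaces enumeration of all 2^n subsets via itertools.combinations (with a quadratic all-pairs coprimality re-check on each subset) by an include/exclude backtracking recursion that maintains the chosen prefix and only extends prefixes whose elements are pairwise compatible, pruning every subset containing an incompatible pair and re-checking each new element only against the chosen elements.
import Mathlib
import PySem

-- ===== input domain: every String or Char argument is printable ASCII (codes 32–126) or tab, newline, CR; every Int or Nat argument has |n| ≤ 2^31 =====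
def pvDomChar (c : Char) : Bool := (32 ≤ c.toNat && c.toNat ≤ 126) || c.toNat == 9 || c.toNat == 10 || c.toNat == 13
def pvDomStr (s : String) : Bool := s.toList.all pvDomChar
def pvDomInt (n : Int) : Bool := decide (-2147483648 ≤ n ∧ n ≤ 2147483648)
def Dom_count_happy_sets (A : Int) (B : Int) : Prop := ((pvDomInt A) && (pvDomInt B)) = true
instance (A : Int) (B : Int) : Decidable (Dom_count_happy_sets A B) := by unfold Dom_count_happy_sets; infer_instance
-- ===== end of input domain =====

-- B replaces A's enumeration of all 2^n subsets (with a quadratic pairwise re-check on each)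
-- by a pruned include/exclude backtracking recursion that only extends pairwise-compatible
-- prefixes; objective: alternative.

-- ===== PORT A =====

-- Python's `while y: x, y = y, x % y` terminates because |x % y| < |y| (floor mod).
theorem pyMod_natAbs_lt (x y : Int) (h : y ≠ 0) :
    (PySem.Int.mod x y).natAbs < y.natAbs := by
  rcases lt_or_gt_of_ne h with hy | hy
  · have := PySem.Int.mod_neg_bounds x hy
    omega
  · have h1 := PySem.Int.mod_nonneg x hy
    have h2 := PySem.Int.mod_lt x hy
    omega

-- the loop of is_coprime / gcd: returns the final x
def euclidLoop (x y : Int) : Int :=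
  if _h : y ≠ 0 then euclidLoop y (PySem.Int.mod x y) else x
termination_by y.natAbs
decreasing_by exact pyMod_natAbs_lt x y _h

def isCoprime (x y : Int) : Bool := euclidLoop x y == 1

def count_happy_sets (A : Int) (B : Int) : Int :=
  if A > B then 0
  else
    let cards := PySem.List.pyRange A (B + 1) 1
    (PySem.List.pyRange 0 (cards.length + 1) 1).foldl (fun happy_count r =>
      (PySem.List.combinations cards r.toNat).foldl (fun happy_count subset =>
        if subset.length > 0 then
          -- for x, y in combinations(subset, 2): if not is_coprime(x, y): all_coprime = False; break
          let all_coprime := (PySem.List.combinations subset 2).foldl (fun ok c =>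
            if (match c with | [x, y] => !isCoprime x y | _ => false) then false else ok) true
          if all_coprime then happy_count + 1 else happy_count
        else happy_count) happy_count) 0

-- ===== PORT B =====

def goAlt : List Int → List Int → Int
  | [], _ => 0
  | x :: rest, chosen =>
    let total := goAlt rest chosen
    if chosen.all (fun c => euclidLoop c x == 1) then total + (1 + goAlt rest (chosen ++ [x]))
    else total

def count_happy_sets_alt (A : Int) (B : Int) : Int :=
  if A > B then 0 else goAlt (PySem.List.pyRange A (B + 1) 1) []

-- ===== PRECONDITION & SPEC =====
def Spec_count_happy_sets (A : Int) (B : Int) (out : Int) : Prop := out = count_happy_sets_alt A B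
instance (A : Int) (B : Int) (out : Int) : Decidable (Spec_count_happy_sets A B out) := by unfold Spec_count_happy_sets; infer_instance

-- ===== CLAIM (what is proved, stated in full; the proofs are below) =====
def Claim_equal_count_happy_sets : Prop := ∀ (A : Int) (B : Int), Dom_count_happy_sets A B → Spec_count_happy_sets A B (count_happy_sets A B)

-- ===== LEMMAS AND PROOFS =====

-- compatibility of x with every already-chosen card
def compat (chosen : List Int) (x : Int) : Bool := chosen.all (fun c => euclidLoop c x == 1)

-- incremental pairwise-compatibility of chosen ++ s, as B maintains it
def chainOK : List Int → List Int → Bool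
  | _, [] => true
  | chosen, x :: s => compat chosen x && chainOK (chosen ++ [x]) s

theorem chainOK_iff (s : List Int) : ∀ chosen : List Int,
    chainOK chosen s = true ↔
      (∀ x ∈ s, ∀ c ∈ chosen, euclidLoop c x = 1) ∧
        s.Pairwise (fun x y => euclidLoop x y = 1) := by
  induction s with
  | nil => intro chosen; simp [chainOK]
  | cons x t ih =>
    intro chosen
    simp only [chainOK, compat, Bool.and_eq_true, List.all_eq_true, beq_iff_eq,
      ih (chosen ++ [x]), List.mem_append, List.pairwise_cons, List.mem_cons]
    constructor
    · rintro ⟨h1, h2, h3⟩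
      refine ⟨?_, fun y hy => h2 y hy x (Or.inr (Or.inl rfl)), h3⟩
      rintro z (rfl | hz) c hc
      · exact h1 c hc
      · exact h2 z hz c (Or.inl hc)
    · rintro ⟨h1, h2, h3⟩
      refine ⟨fun c hc => h1 x (Or.inl rfl) c hc, ?_, h3⟩
      rintro y hy c (hc | rfl | hf)
      · exact h1 y (Or.inr hy) c hc
      · exact h2 y hy
      · simp at hf

-- A's inner all-pairs check equals Pairwise coprimality
theorem allCoprime_eq (s : List Int) :
    ((PySem.List.combinations s 2).foldl (fun ok c =>
        if (match c with | [x, y] => !isCoprime x y | _ => false) then false else ok) true)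
      = decide (s.Pairwise (fun x y => euclidLoop x y = 1)) := by
  rw [PySem.List.foldl_if_false_eq]
  simp only [Bool.true_and]
  cases hany : (PySem.List.combinations s 2).any
      (fun c => (match c with | [x, y] => !isCoprime x y | _ => false)) with
  | false =>
    simp only [Bool.not_false]
    symm
    rw [decide_eq_true_iff, List.pairwise_iff_forall_sublist]
    intro a b hsub
    have hmem : [a, b] ∈ PySem.List.combinations s 2 :=
      (PySem.List.mem_combinations_iff s 2 [a, b]).2 ⟨hsub, rfl⟩
    have h := List.any_eq_false.1 hany [a, b] hmem
    simpa [isCoprime] using h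
  | true =>
    simp only [Bool.not_true]
    symm
    rw [decide_eq_false_iff_not, List.pairwise_iff_forall_sublist]
    obtain ⟨c, hc, hpc⟩ := List.any_eq_true.1 hany
    obtain ⟨hsub, hlen⟩ := (PySem.List.mem_combinations_iff s 2 c).1 hc
    match c, hlen with
    | [a, b], _ =>
      intro hall
      have h := hall hsub
      simp [isCoprime, h] at hpc

-- B's recursion counts, among sublists of xs, those s with chainOK chosen s (empty included)
theorem goAlt_full (xs : List Int) : ∀ chosen,
    ((xs.sublists'.countP (fun s => chainOK chosen s) : Int)) = goAlt xs chosen + 1 := by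
  induction xs with
  | nil => intro chosen; simp [chainOK, goAlt]
  | cons x t ih =>
    intro chosen
    rw [List.sublists'_cons, List.countP_append, List.countP_map]
    cases hc : compat chosen x with
    | false =>
      have hz : (t.sublists'.countP ((fun s => chainOK chosen s) ∘ (List.cons x))) = 0 :=
        List.countP_eq_zero.2 (fun s _ => by simp [Function.comp, chainOK, hc])
      simp only [compat] at hc
      simp only [goAlt, hc, Bool.false_eq_true, if_false, hz, Nat.add_zero]
      exact ih chosen
    | true =>
      have he : (t.sublists'.countP ((fun s => chainOK chosen s) ∘ (List.cons x)))
          = (t.sublists'.countP (fun s => chainOK (chosen ++ [x]) s)) :=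
        List.countP_congr (fun s _ => by simp [Function.comp, chainOK, hc])
      rw [he]
      simp only [compat] at hc
      simp only [goAlt, hc, if_true]
      have h1 := ih chosen
      have h2 := ih (chosen ++ [x])
      push_cast
      omega

-- and excluding the empty sublist it is exactly goAlt
theorem goAlt_count (xs : List Int) : ∀ chosen,
    ((xs.sublists'.countP (fun s => !s.isEmpty && chainOK chosen s) : Int)) = goAlt xs chosen := by
  induction xs with
  | nil => intro chosen; simp [goAlt]
  | cons x t ih =>
    intro chosen
    rw [List.sublists'_cons, List.countP_append, List.countP_map]
    cases hc : compat chosen x with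
    | false =>
      have hz : (t.sublists'.countP ((fun s => !s.isEmpty && chainOK chosen s) ∘ (List.cons x))) = 0 :=
        List.countP_eq_zero.2 (fun s _ => by simp [Function.comp, chainOK, hc])
      simp only [compat] at hc
      simp only [goAlt, hc, Bool.false_eq_true, if_false, hz, Nat.add_zero]
      exact ih chosen
    | true =>
      have he : (t.sublists'.countP ((fun s => !s.isEmpty && chainOK chosen s) ∘ (List.cons x)))
          = (t.sublists'.countP (fun s => chainOK (chosen ++ [x]) s)) :=
        List.countP_congr (fun s _ => by simp [Function.comp, chainOK, hc])
      rw [he]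
      simp only [compat] at hc
      simp only [goAlt, hc, if_true]
      have h1 := ih chosen
      have h2 := goAlt_full t (chosen ++ [x])
      push_cast
      omega

-- A's `combinations cards r` has the same count as Mathlib's sublistsLen r cards
theorem countP_combinations (xs : List Int) : ∀ (r : Nat) (p : List Int → Bool),
    (PySem.List.combinations xs r).countP p = (List.sublistsLen r xs).countP p := by
  induction xs with
  | nil =>
    intro r p
    cases r <;> simp [PySem.List.combinations_zero, PySem.List.combinations_nil_succ]
  | cons x t ih =>
    intro r p
    cases r with
    | zero => simp [PySem.List.combinations_zero]
    | succ r =>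
      rw [PySem.List.combinations_cons_succ, List.sublistsLen_succ_cons,
        List.countP_append, List.countP_append, List.countP_map, List.countP_map,
        ih r, ih (r + 1)]
      have hco : List.countP (p ∘ fun c => x :: c) (List.sublistsLen r t)
          = List.countP (p ∘ List.cons x) (List.sublistsLen r t) := rfl
      omega

-- the per-subset predicate of A's loops
def qA (s : List Int) : Bool :=
  decide (s.length > 0) &&
    ((PySem.List.combinations s 2).foldl (fun ok c =>
      if (match c with | [x, y] => !isCoprime x y | _ => false) then false else ok) true)

-- main bridge for any list of cards
theorem main_bridge (cards : List Int) :
    (PySem.List.pyRange 0 ((cards.length : Int) + 1) 1).foldl (fun happy_count r =>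
      (PySem.List.combinations cards r.toNat).foldl (fun happy_count subset =>
        if subset.length > 0 then
          let all_coprime := (PySem.List.combinations subset 2).foldl (fun ok c =>
            if (match c with | [x, y] => !isCoprime x y | _ => false) then false else ok) true
          if all_coprime then happy_count + 1 else happy_count
        else happy_count) happy_count) 0
    = goAlt cards [] := by
  have hinner : ∀ (r : Int) (acc : Int),
      (PySem.List.combinations cards r.toNat).foldl (fun happy_count subset =>
        if subset.length > 0 then
          let all_coprime := (PySem.List.combinations subset 2).foldl (fun ok c =>
            if (match c with | [x, y] => !isCoprime x y | _ => false) then false else ok) true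
          if all_coprime then happy_count + 1 else happy_count
        else happy_count) acc
      = acc + ((PySem.List.combinations cards r.toNat).countP qA : Int) := by
    intro r acc
    rw [← PySem.List.foldl_if_add_one qA]
    apply PySem.List.foldl_congr_mem
    intro a s _
    by_cases h1 : s.length > 0 <;> simp [qA, h1]
  calc
    _ = (PySem.List.pyRange 0 ((cards.length : Int) + 1) 1).foldl
          (fun acc r => acc + ((PySem.List.combinations cards r.toNat).countP qA : Int)) 0 := by
          apply PySem.List.foldl_congr_mem
          intro acc r _
          exact hinner r acc
    _ = 0 + ((PySem.List.pyRange 0 ((cards.length : Int) + 1) 1).map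
          (fun r => ((PySem.List.combinations cards r.toNat).countP qA : Int))).sum := by
          rw [PySem.List.foldl_add]
    _ = ((List.range (cards.length + 1)).map
          (fun k => ((List.sublistsLen k cards).countP qA : Int))).sum := by
          rw [PySem.List.pyRange_one]
          have h1 : (((cards.length : Int) + 1 - 0).toNat) = cards.length + 1 := by omega
          rw [h1, List.map_map, zero_add]
          apply congrArg
          apply List.map_congr_left
          intro k _
          simp [countP_combinations]
    _ = (((List.range (cards.length + 1)).map
          (fun k => (List.sublistsLen k cards).countP qA)).sum : Int) := by
          rw [Nat.cast_list_sum, List.map_map]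
          rfl
    _ = ((cards.sublists'.countP qA : Nat) : Int) := by
          congr 1
          have hperm := List.range_bind_sublistsLen_perm cards
          rw [← hperm.countP_eq qA, List.countP_flatMap]
          rfl
    _ = (cards.sublists'.countP (fun s => !s.isEmpty && chainOK [] s) : Int) := by
          congr 1
          apply List.countP_congr
          intro s _
          cases s with
          | nil => simp [qA]
          | cons a l =>
            have hl : (0 < (a :: l).length) := by simp
            simp only [qA, hl, decide_true, Bool.true_and, List.isEmpty_cons,
              Bool.not_false, Bool.true_and]
            rw [allCoprime_eq]
            cases hcb : chainOK [] (a :: l) with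
            | false =>
              rw [decide_eq_false]
              intro hp
              exact (by simp [hcb] : ¬ chainOK [] (a :: l) = true)
                ((chainOK_iff (a :: l) []).2 ⟨by simp, hp⟩)
            | true =>
              rw [decide_eq_true ((chainOK_iff (a :: l) []).1 hcb).2]
    _ = goAlt cards [] := goAlt_count cards []

-- ===== VERDICT (by name: the statement is the Claim_ definition above) =====
theorem count_happy_sets_spec : Claim_equal_count_happy_sets := by
  intro A B _
  unfold Spec_count_happy_sets count_happy_sets count_happy_sets_alt
  by_cases h : A > B
  · simp [h]
  · simp only [h, if_false]
    exact main_bridge (PySem.List.pyRange A (B + 1) 1)
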